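-- pv_equiv track=rewrite | github.com/83d/coze_docs | single_page_get/post_processor.py | remove_orphan_dashes
-- ===== SOURCE A (Python) =====
-- def remove_orphan_dashes(text):
--     """移除孤立的 `-` 列表项（图片占位符残留）"""
--     lines = text.split("\n")
--     result = []
--     for i, line in enumerate(lines):
--         # 孤立的 `-` 后面跟着多个空行
--         if line.strip() == "-":
--             # 检查后面是否有4个空行
--             if i + 4 < len(lines):
--                 next_4 = [lines[i + 1], lines[i + 2], lines[i + 3], lines[i + 4]]
--                 if all(l.strip() == "" for l in next_4):
--                     # 跳过这个孤立的 `-` 和后面的空行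
--                     continue
--         result.append(line)
--     return "\n".join(result)
-- ===== SOURCE B (Python) =====
-- def remove_orphan_dashes(text):
--     """移除孤立的 `-` 列表项（图片占位符残留）"""
--     kept = []
--     blank_run = 0
--     for line in reversed(text.split("\n")):
--         if line.strip() == "":
--             kept.append(line)
--             blank_run += 1
--         else:
--             if line.strip() == "-" and blank_run >= 4:
--                 pass  # drop the orphan dash
--             else:
--                 kept.append(line)
--             blank_run = 0
--     kept.reverse()
--     return "\n".join(kept)
-- ===== Notes on version B (the rewrite author's own statement) =====
-- stated objective: alternative
-- what changed: Replaces A's forward scan with a 4-line lookahead window of explicit index accesses by a single backward pass that maintains a trailing-blank-run counter and drops an orphan dash line when at least 4 blank lines follow it.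
import Mathlib
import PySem

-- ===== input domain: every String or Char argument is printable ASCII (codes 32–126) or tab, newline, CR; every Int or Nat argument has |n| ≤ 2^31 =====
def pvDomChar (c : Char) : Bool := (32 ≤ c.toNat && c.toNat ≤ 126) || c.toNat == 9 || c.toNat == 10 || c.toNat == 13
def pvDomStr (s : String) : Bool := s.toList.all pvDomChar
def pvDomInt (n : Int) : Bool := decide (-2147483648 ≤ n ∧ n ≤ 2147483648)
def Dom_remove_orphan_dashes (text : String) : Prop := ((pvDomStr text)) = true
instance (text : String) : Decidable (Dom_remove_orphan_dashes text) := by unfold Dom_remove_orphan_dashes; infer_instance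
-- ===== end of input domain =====

-- B replaces A's forward scan with a 4-line lookahead window by a single backward pass
-- keeping a trailing-blank-run counter (objective: alternative decomposition, same cost).

-- ===== PORT A =====
-- loop body of A; the pyGetD accesses are exact because they are guarded by i + 4 < len(lines)
def pvAStep (lines : List String) (result : List String) (p : Int × String) : List String :=
  if PySem.Str.strip p.2 = "-" then
    if p.1 + 4 < (lines.length : Int) then
      let next4 := [PySem.List.pyGetD lines (p.1 + 1) "", PySem.List.pyGetD lines (p.1 + 2) "",
                    PySem.List.pyGetD lines (p.1 + 3) "", PySem.List.pyGetD lines (p.1 + 4) ""]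
      if next4.all (fun l => PySem.Str.strip l == "") then result
      else result ++ [p.2]
    else result ++ [p.2]
  else result ++ [p.2]

def remove_orphan_dashes (text : String) : String :=
  let lines := (PySem.Str.split? text "\n").getD []
  PySem.Str.join "\n" ((PySem.List.enumerate lines).foldl (pvAStep lines) [])

-- ===== PORT B =====
-- loop body of B; state = (kept so far, run of consecutive blank lines just below)
def pvBStep (st : List String × Nat) (line : String) : List String × Nat :=
  if PySem.Str.strip line = "" then (line :: st.1, st.2 + 1)
  else if PySem.Str.strip line = "-" ∧ 4 ≤ st.2 then (st.1, 0)
  else (line :: st.1, 0)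

def remove_orphan_dashes_alt (text : String) : String :=
  let lines := (PySem.Str.split? text "\n").getD []
  PySem.Str.join "\n" ((lines.reverse.foldl pvBStep ([], 0)).1)

-- ===== PRECONDITION & SPEC =====
def Spec_remove_orphan_dashes (text : String) (out : String) : Prop := out = remove_orphan_dashes_alt text
instance (text : String) (out : String) : Decidable (Spec_remove_orphan_dashes text out) := by unfold Spec_remove_orphan_dashes; infer_instance

-- ===== CLAIM (what is proved, stated in full; the proofs are below) =====
def Claim_equal_remove_orphan_dashes : Prop := ∀ (text : String), Dom_remove_orphan_dashes text → Spec_remove_orphan_dashes text (remove_orphan_dashes text)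

-- ===== LEMMAS AND PROOFS =====

-- length of the run of blank lines at the head of a list
def pvLB : List String → Nat
  | [] => 0
  | x :: xs => if PySem.Str.strip x = "" then pvLB xs + 1 else 0

-- common characterisation: keep each line unless it strips to "-" and ≥ 4 blanks follow
def pvRec : List String → List String
  | [] => []
  | x :: xs => if PySem.Str.strip x = "-" ∧ 4 ≤ pvLB xs then pvRec xs else x :: pvRec xs

lemma pvLB_ge4 (l : List String) :
    4 ≤ pvLB l ↔ 4 ≤ l.length ∧
      PySem.Str.strip (l[0]?.getD "") = "" ∧ PySem.Str.strip (l[1]?.getD "") = "" ∧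
      PySem.Str.strip (l[2]?.getD "") = "" ∧ PySem.Str.strip (l[3]?.getD "") = "" := by
  rcases l with _ | ⟨a, _ | ⟨b, _ | ⟨c, _ | ⟨d, t⟩⟩⟩⟩ <;>
    simp [pvLB] <;> split_ifs <;> simp_all

lemma bLoop : ∀ l : List String, l.reverse.foldl pvBStep ([], 0) = (pvRec l, pvLB l) := by
  intro l
  induction l with
  | nil => simp [pvRec, pvLB]
  | cons x xs ih =>
    rw [List.reverse_cons, List.foldl_append, ih]
    simp only [List.foldl_cons, List.foldl_nil, pvBStep, pvRec, pvLB]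
    by_cases hb : PySem.Str.strip x = ""
    · have : ¬ (PySem.Str.strip x = "-" ∧ 4 ≤ pvLB xs) := by simp [hb]
      simp [hb, this]
    · by_cases hd : PySem.Str.strip x = "-" ∧ 4 ≤ pvLB xs
      · simp [hb, hd]
      · simp [hb, hd]

lemma aLoop (lines : List String) : ∀ (xs : List String) (k : Nat) (acc : List String),
    lines.drop k = xs →
    (PySem.List.enumerate xs (k : Int)).foldl (pvAStep lines) acc = acc ++ pvRec xs := by
  intro xs
  induction xs with
  | nil => intro k acc h; simp [PySem.List.enumerate_nil, pvRec]
  | cons x t ih =>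
    intro k acc h
    have hk : k < lines.length := by
      by_contra hc
      simp [List.drop_eq_nil_of_le (Nat.le_of_not_lt hc)] at h
    have hlen : lines.length = k + 1 + t.length := by
      have := congrArg List.length h
      simp [List.length_drop] at this
      omega
    have hdrop : lines.drop (k + 1) = t := by
      have : lines.drop (k + 1) = (lines.drop k).drop 1 := by
        rw [← List.drop_drop]
      rw [this, h]; rfl
    have hget : ∀ j : Nat, lines.getD (k + 1 + j) "" = t[j]?.getD "" := by
      intro j
      rw [List.getD_eq_getElem?_getD, ← List.getElem?_drop, hdrop]
    rw [PySem.List.enumerate_cons, List.foldl_cons]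
    have hstep : pvAStep lines acc ((k : Int), x) =
        acc ++ (if PySem.Str.strip x = "-" ∧ 4 ≤ pvLB t then [] else [x]) := by
      unfold pvAStep
      simp only
      by_cases hdash : PySem.Str.strip x = "-"
      · have c1 : ((k : Int) + 1) = ((k + 1 : Nat) : Int) := by push_cast; ring
        have c2 : ((k : Int) + 2) = ((k + 1 + 1 : Nat) : Int) := by push_cast; ring
        have c3 : ((k : Int) + 3) = ((k + 1 + 2 : Nat) : Int) := by push_cast; ring
        have c4 : ((k : Int) + 4) = ((k + 1 + 3 : Nat) : Int) := by push_cast; ring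
        rw [if_pos hdash, c1, c2, c3, c4]
        simp only [PySem.List.pyGetD_natCast]
        have e1 := hget 0; have e2 := hget 1; have e3 := hget 2; have e4 := hget 3
        simp only [Nat.add_zero] at e1
        rw [e1, e2, e3, e4]
        by_cases hlt : 4 ≤ t.length
        · rw [if_pos (show ((k + 1 + 3 : Nat) : Int) < (lines.length : Int) by push_cast; omega)]
          by_cases hall : PySem.Str.strip (t[0]?.getD "") = "" ∧ PySem.Str.strip (t[1]?.getD "") = ""
              ∧ PySem.Str.strip (t[2]?.getD "") = "" ∧ PySem.Str.strip (t[3]?.getD "") = ""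
          · have hc : 4 ≤ pvLB t := (pvLB_ge4 t).2 ⟨hlt, hall.1, hall.2.1, hall.2.2.1, hall.2.2.2⟩
            simp [List.all, hall.1, hall.2.1, hall.2.2.1, hall.2.2.2, hdash, hc]
          · have hc : ¬ 4 ≤ pvLB t := by
              intro hge
              exact hall (((pvLB_ge4 t).1 hge).2)
            have : ¬ (PySem.Str.strip (t[0]?.getD "") == "" && (PySem.Str.strip (t[1]?.getD "") == ""
                && (PySem.Str.strip (t[2]?.getD "") == "" && (PySem.Str.strip (t[3]?.getD "") == "" && true)))) = true := by
              simp only [Bool.and_eq_true, beq_iff_eq, Bool.and_true]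
              intro ⟨a1, a2, a3, a4⟩
              exact hall ⟨a1, a2, a3, a4⟩
            simp only [List.all]
            rw [if_neg this]
            simp [hdash, hc]
        · have hc : ¬ 4 ≤ pvLB t := fun hge => hlt ((pvLB_ge4 t).1 hge).1
          rw [if_neg (show ¬ ((k + 1 + 3 : Nat) : Int) < (lines.length : Int) by push_cast; omega)]
          simp [hdash, hc]
      · simp [hdash]
    rw [hstep]
    have hcast : ((k : Int) + 1) = ((k + 1 : Nat) : Int) := by push_cast; ring
    rw [hcast, ih (k + 1) _ hdrop]
    simp only [pvRec]
    by_cases hc : PySem.Str.strip x = "-" ∧ 4 ≤ pvLB t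
    · simp [hc]
    · simp [hc]

-- ===== VERDICT (by name: the statement is the Claim_ definition above) =====
theorem remove_orphan_dashes_spec : Claim_equal_remove_orphan_dashes := by
  intro text _
  unfold Spec_remove_orphan_dashes remove_orphan_dashes remove_orphan_dashes_alt
  have hA := aLoop ((PySem.Str.split? text "\n").getD []) ((PySem.Str.split? text "\n").getD []) 0 [] (by simp)
  have hB := bLoop ((PySem.Str.split? text "\n").getD [])
  simp only [Nat.cast_zero, List.nil_append] at hA
  dsimp only
  rw [hA, hB]
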